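-- pv_equiv track=rewrite | github.com/vaishnaviborekar16/Python_basics | python_work/assignment_day2/question_3.py | can_form_strings
-- ===== SOURCE A (Python) =====
-- def can_form_strings(A, B, C):
--     """
--     Checks if strings A and B can be formed using all characters of string C.
--
--     Args:
--         A: The first string.
--         B: The second string.
--         C: The string containing characters to form A and B.
--
--     Returns:
--         "YES" if A and B can be formed using all characters of C, and C is empty afterward.
--         "NO" otherwise.
--     """
--
--     # Create a dictionary to count the occurrences of each character in C
--     char_count = {}
--     for char in C:
--         char_count[char] = char_count.get(char, 0) + 1
--
--     # Check if all characters of A can be formed from C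
--     for char in A:
--         if char not in char_count or char_count[char] == 0:
--             return "NO"
--         char_count[char] -= 1
--
--     # Check if all characters of B can be formed from the remaining characters in C
--     for char in B:
--         if char not in char_count or char_count[char] == 0:
--             return "NO"
--         char_count[char] -= 1
--
--     # Check if all characters in C have been used
--     for count in char_count.values():
--         if count != 0:
--             return "NO"
--
--     return "YES"
-- ===== SOURCE B (Python) =====
-- def can_form_strings(A, B, C):
--     return "YES" if sorted(A + B) == sorted(C) else "NO"
-- ===== Notes on version B (the rewrite author's own statement) =====
-- stated objective: simpler
-- what changed: Replaces the three sequential loops over a decrementing character-count dict (with per-character early returns and a final all-zero scan) by a single multiset comparison: sorted(A + B) == sorted(C).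
import Mathlib
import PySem

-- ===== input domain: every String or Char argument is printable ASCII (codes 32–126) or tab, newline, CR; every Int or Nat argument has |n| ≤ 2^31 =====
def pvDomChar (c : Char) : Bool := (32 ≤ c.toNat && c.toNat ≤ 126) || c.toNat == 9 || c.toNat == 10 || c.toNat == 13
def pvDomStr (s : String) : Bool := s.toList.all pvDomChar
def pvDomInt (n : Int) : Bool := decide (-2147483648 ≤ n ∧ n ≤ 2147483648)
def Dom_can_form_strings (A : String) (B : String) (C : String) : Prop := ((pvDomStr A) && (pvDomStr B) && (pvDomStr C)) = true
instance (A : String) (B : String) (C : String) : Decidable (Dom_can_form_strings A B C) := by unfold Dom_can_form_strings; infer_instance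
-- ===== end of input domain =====

-- B replaces A's decrementing count-dict with its three loops and early returns by one
-- multiset comparison sorted(A+B) == sorted(C); objective: simpler (not faster).

-- ===== PORT A =====
-- the 'for char in A' / 'for char in B' loops: look up, fail on missing/zero, else decrement
def pvConsume (S : List Char) (d : PySem.Dict Char Int) : Option (PySem.Dict Char Int) :=
  match S with
  | [] => some d
  | c :: rest =>
    match d.get? c with
    | none => none
    | some v => if v = 0 then none else pvConsume rest (d.insert c (v - 1))

-- the final 'for count in char_count.values()' loop
def pvCheckZeros (l : List Int) : String :=
  match l with
  | [] => "YES"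
  | v :: rest => if v ≠ 0 then "NO" else pvCheckZeros rest

def can_form_strings (A : String) (B : String) (C : String) : String :=
  let char_count := C.toList.foldl (fun d ch => d.insert ch (d.getD ch 0 + 1))
    (PySem.Dict.empty : PySem.Dict Char Int)
  match pvConsume A.toList char_count with
  | none => "NO"
  | some d1 =>
    match pvConsume B.toList d1 with
    | none => "NO"
    | some d2 => pvCheckZeros d2.values

-- ===== PORT B =====
def can_form_strings_alt (A : String) (B : String) (C : String) : String :=
  if PySem.List.sorted (A.toList ++ B.toList) (fun x => x) false
      = PySem.List.sorted C.toList (fun x => x) false then "YES" else "NO"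

-- ===== PRECONDITION & SPEC =====
def Spec_can_form_strings (A : String) (B : String) (C : String) (out : String) : Prop := out = can_form_strings_alt A B C
instance (A : String) (B : String) (C : String) (out : String) : Decidable (Spec_can_form_strings A B C out) := by unfold Spec_can_form_strings; infer_instance

-- ===== CLAIM (what is proved, stated in full; the proofs are below) =====
def Claim_equal_can_form_strings : Prop := ∀ (A : String) (B : String) (C : String), Dom_can_form_strings A B C → Spec_can_form_strings A B C (can_form_strings A B C)

-- ===== LEMMAS AND PROOFS =====

-- successful run of a consume loop: exists iff every character fits, and it subtracts the counts
lemma pvConsume_some (S : List Char) : ∀ d : PySem.Dict Char Int,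
    (∀ c, 0 ≤ d.getD c 0) → (∀ c, (S.count c : Int) ≤ d.getD c 0) →
    ∃ d', pvConsume S d = some d' ∧ d'.keys = d.keys ∧
      ∀ c, d'.getD c 0 = d.getD c 0 - S.count c := by
  induction S with
  | nil =>
    intro d _ _
    exact ⟨d, rfl, rfl, by simp⟩
  | cons c rest ih =>
    intro d hnn hle
    have hc := hle c
    have hcnt : (0 : Int) < d.getD c 0 := by
      have : (1 : Int) ≤ ((c :: rest).count c : Int) := by simp
      omega
    cases hg : d.get? c with
    | none =>
      exfalso
      have := PySem.Dict.getD_of_get?_eq_none (d := d) (d0 := (0:Int)) hg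
      omega
    | some v =>
      have hv : d.getD c 0 = v := PySem.Dict.getD_of_get?_eq_some (d := d) (d0 := (0:Int)) hg
      have hvpos : (0 : Int) < v := by omega
      have hne : ¬ v = 0 := by omega
      have hgetD : ∀ b, (d.insert c (v - 1)).getD b 0 = if b = c then v - 1 else d.getD b 0 :=
        fun b => PySem.Dict.getD_insert d c b (v - 1) 0
      have hnn' : ∀ b, 0 ≤ (d.insert c (v - 1)).getD b 0 := by
        intro b; rw [hgetD b]; split_ifs with h
        · omega
        · exact hnn b
      have hle' : ∀ b, ((rest.count b : Int)) ≤ (d.insert c (v - 1)).getD b 0 := by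
        intro b; rw [hgetD b]; split_ifs with h
        · subst h
          have := hle b
          simp at this
          omega
        · have h' : ¬ c = b := fun e => h e.symm
          have := hle b
          simp [h'] at this
          exact this
      obtain ⟨d', hrun, hkeys, hsub⟩ := ih (d.insert c (v - 1)) hnn' hle'
      refine ⟨d', ?_, ?_, ?_⟩
      · simp [pvConsume, hg, hne, hrun]
      · rw [hkeys]
        have hcont : d.contains c = true := by
          rw [PySem.Dict.contains_eq_isSome_get?, hg]; rfl
        exact PySem.Dict.keys_insert_of_contains d (v - 1) hcont
      · intro b
        rw [hsub b, hgetD b]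
        by_cases h : b = c
        · subst h; simp; omega
        · have h' : ¬ c = b := fun e => h e.symm
          rw [if_neg h]
          simp [h']

-- failing run: if some character does not fit, the loop returns none
lemma pvConsume_none (S : List Char) : ∀ d : PySem.Dict Char Int,
    (∀ c, 0 ≤ d.getD c 0) → ¬ (∀ c, (S.count c : Int) ≤ d.getD c 0) →
    pvConsume S d = none := by
  induction S with
  | nil =>
    intro d hnn h
    exfalso; exact h fun c => by simpa using hnn c
  | cons c rest ih =>
    intro d hnn h
    cases hg : d.get? c with
    | none => simp [pvConsume, hg]
    | some v =>
      have hv : d.getD c 0 = v := PySem.Dict.getD_of_get?_eq_some (d := d) (d0 := (0:Int)) hg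
      by_cases hvz : v = 0
      · simp [pvConsume, hg, hvz]
      · have hvpos : (0 : Int) < v := by have := hnn c; omega
        have hgetD : ∀ b, (d.insert c (v - 1)).getD b 0 = if b = c then v - 1 else d.getD b 0 :=
          fun b => PySem.Dict.getD_insert d c b (v - 1) 0
        have hnn' : ∀ b, 0 ≤ (d.insert c (v - 1)).getD b 0 := by
          intro b; rw [hgetD b]; split_ifs with hb
          · omega
          · exact hnn b
        have h' : ¬ (∀ b, ((rest.count b : Int)) ≤ (d.insert c (v - 1)).getD b 0) := by
          intro hall
          apply h
          intro b
          have := hall b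
          rw [hgetD b] at this
          by_cases hb : b = c
          · subst hb; rw [if_pos rfl] at this; simp; omega
          · have hb' : ¬ c = b := fun e => hb e.symm
            rw [if_neg hb] at this
            simp [hb']
            exact this
        simp [pvConsume, hg, hvz, ih _ hnn' h']

lemma pvCheckZeros_yes (l : List Int) : pvCheckZeros l = "YES" ↔ ∀ v ∈ l, v = 0 := by
  induction l with
  | nil => simp [pvCheckZeros]
  | cons v rest ih =>
    by_cases hv : v = 0
    · simp [pvCheckZeros, hv, ih]
    · simp [pvCheckZeros, hv]

lemma pvCheckZeros_no (l : List Int) : pvCheckZeros l ≠ "YES" → pvCheckZeros l = "NO" := by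
  induction l with
  | nil => simp [pvCheckZeros]
  | cons v rest ih =>
    by_cases hv : v = 0
    · simpa [pvCheckZeros, hv] using ih
    · simp [pvCheckZeros, hv]

-- all dict values are zero iff every getD-with-default-0 is zero (keys unique)
lemma values_zero_iff (d : PySem.Dict Char Int) (h : d.keys.Nodup) :
    (∀ v ∈ d.values, v = 0) ↔ ∀ c, d.getD c 0 = 0 := by
  constructor
  · intro hall c
    cases hg : d.get? c with
    | none => exact PySem.Dict.getD_of_get?_eq_none (d := d) (d0 := (0:Int)) hg
    | some v =>
      have hmem : (c, v) ∈ d.items := PySem.Dict.mem_items_of_get?_eq_some (d := d) hg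
      have hv : v ∈ d.values := by
        simp only [PySem.Dict.values]
        exact List.mem_map.mpr ⟨(c, v), hmem, rfl⟩
      have := hall v hv
      rw [PySem.Dict.getD_of_get?_eq_some (d := d) (d0 := (0:Int)) hg, this]
  · intro hall v hv
    simp only [PySem.Dict.values] at hv
    obtain ⟨⟨k, w⟩, hmem, hw⟩ := List.mem_map.mp hv
    cases hw
    have := PySem.Dict.getD_of_mem_items (d := d) (d0 := (0:Int)) hmem h
    rw [← this]; exact hall k

-- A's result is "YES" or "NO" depending on multiset equality of A++B with C
lemma portA_eq (A B C : String) :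
    can_form_strings A B C =
      (if ∀ c : Char, ((A.toList ++ B.toList).count c : Int) = (C.toList.count c : Int)
       then "YES" else "NO") := by
  unfold can_form_strings
  have hcnt : ∀ c, (C.toList.foldl (fun d ch => d.insert ch (d.getD ch 0 + 1))
      (PySem.Dict.empty : PySem.Dict Char Int)).getD c 0 = (C.toList.count c : Int) := by
    intro c
    rw [PySem.Dict.getD_foldl_insert_add_one]
    simp
  have hnodup : (C.toList.foldl (fun d ch => d.insert ch (d.getD ch 0 + 1))
      (PySem.Dict.empty : PySem.Dict Char Int)).keys.Nodup :=
    PySem.Dict.nodup_keys_foldl_insert _ _ _ PySem.Dict.nodup_keys_empty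
  set d0 := C.toList.foldl (fun d ch => d.insert ch (d.getD ch 0 + 1))
    (PySem.Dict.empty : PySem.Dict Char Int) with hd0
  have hnn0 : ∀ c, (0:Int) ≤ d0.getD c 0 := fun c => by
    rw [hcnt c]; exact Int.natCast_nonneg _
  show (match pvConsume A.toList d0 with
    | none => "NO"
    | some d1 =>
      match pvConsume B.toList d1 with
      | none => "NO"
      | some d2 => pvCheckZeros d2.values) = _
  by_cases hA : ∀ c, (A.toList.count c : Int) ≤ d0.getD c 0
  · obtain ⟨d1, hrun1, hkeys1, hsub1⟩ := pvConsume_some A.toList d0 hnn0 hA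
    have hnn1 : ∀ c, (0:Int) ≤ d1.getD c 0 := by
      intro c; rw [hsub1 c]; have := hA c; omega
    rw [hrun1]
    show (match pvConsume B.toList d1 with
      | none => "NO"
      | some d2 => pvCheckZeros d2.values) = _
    by_cases hB : ∀ c, (B.toList.count c : Int) ≤ d1.getD c 0
    · obtain ⟨d2, hrun2, hkeys2, hsub2⟩ := pvConsume_some B.toList d1 hnn1 hB
      rw [hrun2]
      show pvCheckZeros d2.values = _
      have hd2 : ∀ c, d2.getD c 0 = (C.toList.count c : Int)
          - A.toList.count c - B.toList.count c := by
        intro c; rw [hsub2 c, hsub1 c, hcnt c]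
      have hnod2 : d2.keys.Nodup := by rw [hkeys2, hkeys1]; exact hnodup
      by_cases hall : ∀ c : Char, ((A.toList ++ B.toList).count c : Int) = (C.toList.count c : Int)
      · rw [if_pos hall, (pvCheckZeros_yes d2.values).mpr]
        rw [values_zero_iff d2 hnod2]
        intro c
        have := hall c
        rw [List.count_append] at this
        push_cast at this
        rw [hd2 c]; omega
      · rw [if_neg hall]
        apply pvCheckZeros_no
        intro hy
        have hz := (values_zero_iff d2 hnod2).mp ((pvCheckZeros_yes d2.values).mp hy)
        apply hall
        intro c
        have := hz c
        rw [hd2 c] at this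
        rw [List.count_append]
        push_cast
        omega
    · rw [pvConsume_none B.toList d1 hnn1 hB]
      show "NO" = _
      rw [if_neg]
      intro hall
      apply hB
      intro c
      have := hall c
      rw [List.count_append] at this
      push_cast at this
      rw [hsub1 c, hcnt c]
      have hbc : (0:Int) ≤ (A.toList.count c : Int) := Int.natCast_nonneg _
      omega
  · rw [pvConsume_none A.toList d0 hnn0 hA]
    show "NO" = _
    rw [if_neg]
    intro hall
    apply hA
    intro c
    have := hall c
    rw [List.count_append] at this
    push_cast at this
    rw [hcnt c]
    have hbc : (0:Int) ≤ (B.toList.count c : Int) := Int.natCast_nonneg _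
    omega

-- ===== VERDICT (by name: the statement is the Claim_ definition above) =====
theorem can_form_strings_spec : Claim_equal_can_form_strings := by
  intro A B C _
  unfold Spec_can_form_strings can_form_strings_alt
  rw [portA_eq]
  by_cases h : (A.toList ++ B.toList).Perm C.toList
  · rw [if_pos ((PySem.List.sorted_id_eq_sorted_id_iff_perm _ _).mpr h)]
    rw [if_pos (fun c => by exact_mod_cast (List.perm_iff_count.mp h) c)]
  · rw [if_neg (fun e => h ((PySem.List.sorted_id_eq_sorted_id_iff_perm _ _).mp e))]
    rw [if_neg (fun hall => h (List.perm_iff_count.mpr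
      (fun c => by exact_mod_cast hall c)))]
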